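-- pv_equiv track=rewrite | github.com/MatKollar/Invoice_OCR_app | backend/app/paddleParser.py | get_payment_method
-- ===== SOURCE A (Python) =====
-- def get_payment_method(words):
--     payment_method = ''
--     for i, word in enumerate(words):
--         if any([kw in word.lower() for kw in ('forma uhrady', 'sposob uhrady', 'forma platby', 'sposob platby', 'spos. uhrady', 'uhrada', 'platba')]):
--             for j in range(i, len(words)):
--                 next_word = words[j]
--                 if any(x in next_word.lower() for x in ['prevod', 'prevodom']):
--                     return 'Bankovým prevodom'
--                 elif any(x in next_word.lower() for x in ['hotovosť', 'hotovosťou', 'hotovosti']):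
--                     return 'Hotovosťou'
--                 elif any(x in next_word.lower() for x in ['dobierka', 'dobierkou']):
--                     return 'Dobierkou'
--                 elif any(x in next_word.lower() for x in ['karta', 'kartou']):
--                     return 'Kartou'
--                 elif any(x in next_word.lower() for x in ['paypal', 'paypalom']):
--                     return 'PayPal'
--                 elif any(x in next_word.lower() for x in ['terminal', 'terminalom']):
--                     return 'Platobným terminálom'
--                 elif ':PP' in next_word:
--                     return 'PP'
--
--     return payment_method
-- ===== SOURCE B (Python) =====
-- _TRIGGERS = ('forma uhrady', 'sposob uhrady', 'forma platby', 'sposob platby',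
--              'spos. uhrady', 'uhrada', 'platba')
--
--
-- def get_payment_method(words):
--     # Single right-to-left pass with two accumulators: `scan` holds the
--     # priority-chain result of the suffix starting at the current word, and
--     # each trigger word snapshots it into `answer`; the leftmost trigger is
--     # processed last, so `answer` ends as the scan from the first trigger.
--     answer = ''
--     scan = ''
--     for word in reversed(words):
--         lw = word.lower()
--         if any(x in lw for x in ('prevod', 'prevodom')):
--             scan = 'Bankovým prevodom'
--         elif any(x in lw for x in ('hotovosť', 'hotovosťou', 'hotovosti')):
--             scan = 'Hotovosťou'
--         elif any(x in lw for x in ('dobierka', 'dobierkou')):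
--             scan = 'Dobierkou'
--         elif any(x in lw for x in ('karta', 'kartou')):
--             scan = 'Kartou'
--         elif any(x in lw for x in ('paypal', 'paypalom')):
--             scan = 'PayPal'
--         elif any(x in lw for x in ('terminal', 'terminalom')):
--             scan = 'Platobným terminálom'
--         elif ':PP' in word:
--             scan = 'PP'
--         if any(kw in lw for kw in _TRIGGERS):
--             answer = scan
--     return answer
-- ===== Notes on version B (the rewrite author's own statement) =====
-- stated objective: alternative
-- what changed: Replaces A's nested forward loops (restart a priority scan at every trigger word) by one right-to-left pass with two accumulators: `scan` carries the priority-chain result of the current suffix and every trigger word snapshots it into `answer`, so the leftmost trigger's scan wins without any rescanning.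
import Mathlib
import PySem

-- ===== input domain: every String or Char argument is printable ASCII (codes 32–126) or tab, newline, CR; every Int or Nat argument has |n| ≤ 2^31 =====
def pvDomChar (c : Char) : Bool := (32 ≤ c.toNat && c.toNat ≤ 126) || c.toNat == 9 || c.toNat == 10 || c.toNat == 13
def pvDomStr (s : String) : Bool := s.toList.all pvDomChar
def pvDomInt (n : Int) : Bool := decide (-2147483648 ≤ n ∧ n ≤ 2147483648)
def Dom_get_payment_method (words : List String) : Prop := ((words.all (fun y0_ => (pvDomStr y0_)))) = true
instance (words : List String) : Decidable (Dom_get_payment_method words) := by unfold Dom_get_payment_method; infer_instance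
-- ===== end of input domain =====

-- B replaces A's nested forward loops by a single right-to-left pass with two
-- accumulators (suffix scan result + snapshot at each trigger): alternative.

-- ===== PORT A =====
-- A-side helpers: the trigger test and the elif chain, transliterated branch by branch.
def pmIsTriggerA (word : String) : Bool :=
  PySem.Str.isIn "forma uhrady" (PySem.Str.lower word) ||
  PySem.Str.isIn "sposob uhrady" (PySem.Str.lower word) ||
  PySem.Str.isIn "forma platby" (PySem.Str.lower word) ||
  PySem.Str.isIn "sposob platby" (PySem.Str.lower word) ||
  PySem.Str.isIn "spos. uhrady" (PySem.Str.lower word) ||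
  PySem.Str.isIn "uhrada" (PySem.Str.lower word) ||
  PySem.Str.isIn "platba" (PySem.Str.lower word)

-- the body of A's inner loop: the elif chain on one word (some = the returned string)
def pmChainA (next_word : String) : Option String :=
  if PySem.Str.isIn "prevod" (PySem.Str.lower next_word) || PySem.Str.isIn "prevodom" (PySem.Str.lower next_word) then
    some "Bankovým prevodom"
  else if PySem.Str.isIn "hotovosť" (PySem.Str.lower next_word) || PySem.Str.isIn "hotovosťou" (PySem.Str.lower next_word) || PySem.Str.isIn "hotovosti" (PySem.Str.lower next_word) then
    some "Hotovosťou"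
  else if PySem.Str.isIn "dobierka" (PySem.Str.lower next_word) || PySem.Str.isIn "dobierkou" (PySem.Str.lower next_word) then
    some "Dobierkou"
  else if PySem.Str.isIn "karta" (PySem.Str.lower next_word) || PySem.Str.isIn "kartou" (PySem.Str.lower next_word) then
    some "Kartou"
  else if PySem.Str.isIn "paypal" (PySem.Str.lower next_word) || PySem.Str.isIn "paypalom" (PySem.Str.lower next_word) then
    some "PayPal"
  else if PySem.Str.isIn "terminal" (PySem.Str.lower next_word) || PySem.Str.isIn "terminalom" (PySem.Str.lower next_word) then
    some "Platobným terminálom"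
  else if PySem.Str.isIn ":PP" next_word then
    some "PP"
  else
    none

-- A's inner loop 'for j in range(i, len(words))': scan of the suffix words[i:]
def pmInnerA : List String → Option String
  | [] => none
  | next_word :: rest =>
    match pmChainA next_word with
    | some r => some r
    | none => pmInnerA rest

-- A's outer loop: at each position, on a trigger run the inner loop over the suffix
-- (the current word included); if it returns nothing, continue the outer loop.
def get_payment_method (words : List String) : String :=
  match words with
  | [] => ""
  | word :: rest =>
    if pmIsTriggerA word then
      match pmInnerA (word :: rest) with
      | some r => r
      | none => get_payment_method rest
    else get_payment_method rest

-- ===== PORT B =====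
-- B-side helpers: the elif chain updating `scan` (Source B's loop body) and the trigger test.
def pmChainB (word : String) : Option String :=
  if PySem.Str.isIn "prevod" (PySem.Str.lower word) || PySem.Str.isIn "prevodom" (PySem.Str.lower word) then
    some "Bankovým prevodom"
  else if PySem.Str.isIn "hotovosť" (PySem.Str.lower word) || PySem.Str.isIn "hotovosťou" (PySem.Str.lower word) || PySem.Str.isIn "hotovosti" (PySem.Str.lower word) then
    some "Hotovosťou"
  else if PySem.Str.isIn "dobierka" (PySem.Str.lower word) || PySem.Str.isIn "dobierkou" (PySem.Str.lower word) then
    some "Dobierkou"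
  else if PySem.Str.isIn "karta" (PySem.Str.lower word) || PySem.Str.isIn "kartou" (PySem.Str.lower word) then
    some "Kartou"
  else if PySem.Str.isIn "paypal" (PySem.Str.lower word) || PySem.Str.isIn "paypalom" (PySem.Str.lower word) then
    some "PayPal"
  else if PySem.Str.isIn "terminal" (PySem.Str.lower word) || PySem.Str.isIn "terminalom" (PySem.Str.lower word) then
    some "Platobným terminálom"
  else if PySem.Str.isIn ":PP" word then
    some "PP"
  else
    none

def pmTriggersB : List String :=
  ["forma uhrady", "sposob uhrady", "forma platby", "sposob platby",
   "spos. uhrady", "uhrada", "platba"]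

def pmIsTriggerB (word : String) : Bool :=
  pmTriggersB.any (fun kw => PySem.Str.isIn kw (PySem.Str.lower word))

-- one iteration of Source B's loop: state = (scan, answer)
def pmStepB (st : String × String) (word : String) : String × String :=
  let scan := match pmChainB word with
    | some r => r
    | none => st.1
  let answer := if pmIsTriggerB word then scan else st.2
  (scan, answer)

-- Source B: 'for word in reversed(words)' folding the two accumulators, return answer
def get_payment_method_alt (words : List String) : String :=
  (words.reverse.foldl pmStepB ("", "")).2

-- ===== PRECONDITION & SPEC =====
def Spec_get_payment_method (words : List String) (out : String) : Prop := out = get_payment_method_alt words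
instance (words : List String) (out : String) : Decidable (Spec_get_payment_method words out) := by unfold Spec_get_payment_method; infer_instance

-- ===== CLAIM (what is proved, stated in full; the proofs are below) =====
def Claim_equal_get_payment_method : Prop := ∀ (words : List String), Dom_get_payment_method words → Spec_get_payment_method words (get_payment_method words)

-- ===== LEMMAS AND PROOFS =====

theorem pmChain_eq (w : String) : pmChainB w = pmChainA w := rfl

theorem pmTrigger_eq (w : String) : pmIsTriggerB w = pmIsTriggerA w := by
  simp [pmIsTriggerA, pmIsTriggerB, pmTriggersB, Bool.or_assoc]

theorem pmInner_none_iff (l : List String) :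
    pmInnerA l = none ↔ ∀ w ∈ l, pmChainA w = none := by
  induction l with
  | nil => simp [pmInnerA]
  | cons w ws ih =>
    simp only [pmInnerA, List.mem_cons]
    cases h : pmChainA w <;> simp_all

theorem pmA_empty_of_all_none (l : List String)
    (h : ∀ w ∈ l, pmChainA w = none) : get_payment_method l = "" := by
  induction l with
  | nil => rfl
  | cons w ws ih =>
    have hws : ∀ x ∈ ws, pmChainA x = none := fun x hx => h x (List.mem_cons_of_mem _ hx)
    have hinner : pmInnerA (w :: ws) = none := (pmInner_none_iff (w :: ws)).mpr h
    simp only [get_payment_method, hinner]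
    split <;> exact ih hws

-- the fold invariant: scan = inner-scan result of the list (as "" / value),
-- answer = A's result on the list
theorem pm_fold_inv (l : List String) :
    l.reverse.foldl pmStepB ("", "") =
      ((match pmInnerA l with | some r => r | none => ""), get_payment_method l) := by
  induction l with
  | nil => rfl
  | cons w ws ih =>
    have hstep : (w :: ws).reverse.foldl pmStepB ("", "") =
        pmStepB (ws.reverse.foldl pmStepB ("", "")) w := by
      simp [List.reverse_cons, List.foldl_append]
    rw [hstep, ih]
    simp only [pmStepB, pmChain_eq, pmTrigger_eq]
    cases hc : pmChainA w with
    | some r =>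
      simp [pmInnerA, hc, get_payment_method]
    | none =>
      simp only [pmInnerA, hc, get_payment_method]
      by_cases ht : pmIsTriggerA w
      · simp only [ht, if_true]
        cases hi : pmInnerA ws with
        | some r => simp
        | none =>
          have hall := (pmInner_none_iff ws).mp hi
          simp [pmA_empty_of_all_none ws hall]
      · simp [ht]

theorem pm_main (l : List String) : get_payment_method l = get_payment_method_alt l := by
  unfold get_payment_method_alt
  rw [pm_fold_inv]

-- ===== VERDICT (by name: the statement is the Claim_ definition above) =====
theorem get_payment_method_spec : Claim_equal_get_payment_method := by
  intro words _
  unfold Spec_get_payment_method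
  exact pm_main words
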